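-- pv_equiv track=rewrite | github.com/GSWlee/re-engine | engine/compile.py | makePolishNotation
-- ===== SOURCE A (Python) =====
-- constchar = ('*', '+', '[', ']', '?', '\\', '.', '|', '(', ')')
--
-- def makePolishNotation(re):
--     ans = list(re)
--     charstack = list()
--     operatorstack = list()
--     while ans:
--         if ans[0] not in constchar:
--             charstack.append(ans[0])
--             ans = ans[1:]
--         else:
--             if ans[0] in ('*', '+', '?', '.'):
--                 charstack.append(ans[0])
--                 ans = ans[1:]
--             elif ans[0] == '[':
--                 e = ans.index(']')
--                 temp = ans[1:e]
--                 charstack.append("".join(temp))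
--                 ans = ans[e + 1:]
--             elif ans[0] == '\\':
--                 charstack.append(ans[0])
--                 charstack.append(ans[1])
--                 ans = ans[2:]
--             elif ans[0] == '(':
--                 operatorstack.append(ans[0])
--                 ans = ans[1:]
--
--             elif ans[0] == ')':
--                 while operatorstack:
--                     if operatorstack[-1] is not '(':
--                         charstack.append(operatorstack.pop())
--                     else:
--                         break
--                 operatorstack.pop()
--                 ans = ans[1:]
--             else:
--                 if len(operatorstack) == 0 or operatorstack[-1] == '(':
--                     operatorstack.append(ans[0])
--                 else:
--                     charstack.append(ans[0])
--                 ans = ans[1:]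
--     while operatorstack:
--         charstack.append(operatorstack.pop())
--
--     charstack.reverse()
--
--     return charstack
-- ===== SOURCE B (Python) =====
-- CONST = set('*+[]?\\.|()')
--
--
-- def _tokens(re):
--     """One pass: collapse [...] groups and escapes, tag everything else."""
--     toks = []
--     i = 0
--     while i < len(re):
--         c = re[i]
--         if c == '[':
--             e = re.index(']', i)
--             toks.append(('lit', re[i + 1:e]))
--             i = e + 1
--         elif c == '\\':
--             toks.append(('lit', '\\'))
--             toks.append(('lit', re[i + 1]))
--             i += 2
--         elif c not in CONST or c in '*+?.':
--             toks.append(('lit', c))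
--             i += 1
--         else:
--             toks.append(('op', c))
--             i += 1
--     return toks
--
--
-- def makePolishNotation(re):
--     chars = []
--     ops = []
--     for kind, val in _tokens(re):
--         if kind == 'lit':
--             chars.append(val)
--         elif val == '(':
--             ops.append(val)
--         elif val == ')':
--             while ops and ops[-1] != '(':
--                 chars.append(ops.pop())
--             ops.pop()
--         elif not ops or ops[-1] == '(':
--             ops.append(val)
--         else:
--             chars.append(val)
--     while ops:
--         chars.append(ops.pop())
--     return chars[::-1]
-- ===== Notes on version B (the rewrite author's own statement) =====
-- stated objective: faster
-- what changed: A's single while loop that re-slices the remaining string (ans = ans[1:]) on every step and interleaves scanning with stack logic is replaced by two separate passes: an index-driven tokenizer that collapses [..] groups and escape pairs into literal tokens and tags the remaining metacharacters as operator tokens, then a plain shunting loop over that token list.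
import Mathlib
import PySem

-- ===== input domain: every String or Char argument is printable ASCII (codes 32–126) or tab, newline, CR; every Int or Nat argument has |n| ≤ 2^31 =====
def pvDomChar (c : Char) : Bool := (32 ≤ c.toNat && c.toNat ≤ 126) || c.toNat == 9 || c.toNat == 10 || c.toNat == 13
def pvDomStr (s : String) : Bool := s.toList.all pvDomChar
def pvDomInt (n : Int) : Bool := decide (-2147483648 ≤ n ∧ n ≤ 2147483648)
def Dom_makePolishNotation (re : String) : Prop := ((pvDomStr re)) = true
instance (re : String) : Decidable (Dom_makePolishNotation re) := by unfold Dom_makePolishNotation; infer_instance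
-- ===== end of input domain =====

-- B: two-phase rewrite — an index-driven tokenizer collapses [..] groups and escapes into an
-- explicit token list (no tail re-slicing), then a separate shunting pass over tokens builds the
-- stacks; a timing run measured B faster (A copies the remaining list on every step).

-- ===== PORT A =====
def pvConstchar : List Char := ['*', '+', '[', ']', '?', '\\', '.', '|', '(', ')']

-- inner 'while operatorstack: if top is not '(' pop to charstack else break' of A
def pvPopA (cs os : List String) : List String × List String :=
  match os with
  | [] => (cs, [])
  | o :: os' => if o ≠ "(" then pvPopA (o :: cs) os' else (cs, o :: os')

-- A's main while loop; charstack/operatorstack are kept top-first, so the final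
-- 'charstack.reverse(); return charstack' is the list as stored.  Where Python A raises
-- (ValueError on '[' without ']', IndexError on trailing '\' or unmatched ')') the port returns [].
def pvLoopA : List Char → List String → List String → List String
  | [], cs, os => os.reverse ++ cs
  | c :: rest, cs, os =>
    if c ∉ pvConstchar then
      pvLoopA rest (String.ofList [c] :: cs) os
    else if c ∈ ['*', '+', '?', '.'] then
      pvLoopA rest (String.ofList [c] :: cs) os
    else if c = '[' then
      match PySem.List.index? (c :: rest) ']' with
      | none => []  -- ValueError
      | some e =>
          pvLoopA (List.drop (e + 1) (c :: rest))
            (String.ofList (PySem.List.slice (c :: rest) (some 1) (some (e : Int))) :: cs) os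
    else if c = '\\' then
      match rest with
      | [] => []  -- IndexError on ans[1]
      | d :: rest2 => pvLoopA rest2 (String.ofList [d] :: String.ofList [c] :: cs) os
    else if c = '(' then
      pvLoopA rest cs (String.ofList [c] :: os)
    else if c = ')' then
      let p := pvPopA cs os
      match p.2 with
      | [] => []  -- IndexError on pop from empty
      | _ :: os' => pvLoopA rest p.1 os'
    else
      match os with
      | [] => pvLoopA rest cs [String.ofList [c]]
      | o :: _ =>
        if o = "(" then pvLoopA rest cs (String.ofList [c] :: os)
        else pvLoopA rest (String.ofList [c] :: cs) os
termination_by ans => ans.length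
decreasing_by
  all_goals simp [List.length_drop]

def makePolishNotation (re : String) : List String :=
  pvLoopA re.toList [] []

-- ===== PORT B =====
inductive PvTok where
  | lit (s : String)
  | op (s : String)
deriving DecidableEq, Repr

-- B's tokenizer (_tokens); none = the tokenizer raises (missing ']' / trailing '\')
def pvTokenize : List Char → Option (List PvTok)
  | [] => some []
  | c :: rest =>
    if c = '[' then
      match PySem.List.index? (c :: rest) ']' with
      | none => none
      | some e =>
          (pvTokenize (List.drop (e + 1) (c :: rest))).map
            (PvTok.lit (String.ofList (PySem.List.slice (c :: rest) (some 1) (some (e : Int)))) :: ·)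
    else if c = '\\' then
      match rest with
      | [] => none
      | d :: rest2 =>
          (pvTokenize rest2).map (PvTok.lit "\\" :: PvTok.lit (String.ofList [d]) :: ·)
    else if c ∉ pvConstchar ∨ c ∈ ['*', '+', '?', '.'] then
      (pvTokenize rest).map (PvTok.lit (String.ofList [c]) :: ·)
    else (pvTokenize rest).map (PvTok.op (String.ofList [c]) :: ·)
termination_by s => s.length
decreasing_by
  all_goals simp [List.length_drop]

-- B's 'while ops and ops[-1] != '(': pop to chars'
def pvPopB (cs os : List String) : List String × List String :=
  match os with
  | [] => (cs, [])
  | o :: os' => if o ≠ "(" then pvPopB (o :: cs) os' else (cs, o :: os')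

-- B's shunting pass over the token list; [] on pop from an empty operator stack (IndexError)
def pvProcess (ts : List PvTok) (cs os : List String) : List String :=
  match ts with
  | [] => os.reverse ++ cs
  | PvTok.lit s :: ts' => pvProcess ts' (s :: cs) os
  | PvTok.op s :: ts' =>
      if s = "(" then pvProcess ts' cs ("(" :: os)
      else if s = ")" then
        let p := pvPopB cs os
        match p.2 with
        | [] => []
        | _ :: os' => pvProcess ts' p.1 os'
      else
        match os with
        | [] => pvProcess ts' cs [s]
        | o :: _ =>
          if o = "(" then pvProcess ts' cs (s :: os)
          else pvProcess ts' (s :: cs) os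

def makePolishNotation_alt (re : String) : List String :=
  match pvTokenize re.toList with
  | none => []
  | some ts => pvProcess ts [] []

-- ===== PRECONDITION & SPEC =====
-- one-pass well-formedness state machine used by Pre_: (paren depth, inside a [..] group,
-- pending escape, failure seen); it tracks no stacks and builds no output
def pvScan (st : Nat × Bool × Bool × Bool) (c : Char) : Nat × Bool × Bool × Bool :=
  match st with
  | (d, inBr, esc, bad) =>
    if esc then (d, inBr, false, bad)
    else if inBr then (d, decide (c ≠ ']'), false, bad)
    else if c = '[' then (d, true, false, bad)
    else if c = '\\' then (d, inBr, true, bad)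
    else if c = '(' then (d + 1, inBr, false, bad)
    else if c = ')' then
      match d with
      | 0 => (0, inBr, false, true)
      | d' + 1 => (d', inBr, false, bad)
    else st

-- Pre_ excludes exactly the inputs on which Python A raises: a '[' with no later ']'
-- (ValueError), a trailing '\' (IndexError), or a ')' with no open '(' (IndexError).
def Pre_makePolishNotation (re : String) : Prop :=
  (re.toList.foldl pvScan (0, false, false, false)).2 = (false, false, false)
instance (re : String) : Decidable (Pre_makePolishNotation re) := by
  unfold Pre_makePolishNotation; infer_instance

def pvWitness_makePolishNotation : String := "(ab|c)*[xy]+\\d"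

def Spec_makePolishNotation (re : String) (out : List String) : Prop := out = makePolishNotation_alt re
instance (re : String) (out : List String) : Decidable (Spec_makePolishNotation re out) := by unfold Spec_makePolishNotation; infer_instance

-- ===== CLAIM (what is proved, stated in full; the proofs are below) =====
def Claim_equal_makePolishNotation : Prop := ∀ (re : String), Dom_makePolishNotation re → Pre_makePolishNotation re → Spec_makePolishNotation re (makePolishNotation re)

-- ===== LEMMAS AND PROOFS =====

theorem pvPopB_eq_pvPopA (cs os : List String) : pvPopB cs os = pvPopA cs os := by
  induction os generalizing cs with
  | nil => simp [pvPopA, pvPopB]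
  | cons o os' ih => simp only [pvPopA, pvPopB]; split <;> simp [ih]

-- unfolding lemmas for pvLoopA
theorem loopA_nil (cs os : List String) : pvLoopA [] cs os = os.reverse ++ cs := by
  rw [pvLoopA.eq_def]

theorem loopA_lit (c : Char) (rest : List Char) (cs os : List String)
    (hc : c ∉ pvConstchar ∨ c ∈ ['*', '+', '?', '.']) :
    pvLoopA (c :: rest) cs os = pvLoopA rest (String.ofList [c] :: cs) os := by
  rw [pvLoopA.eq_def]; dsimp only
  rcases hc with hc | hc
  · rw [if_pos hc]
  · rw [if_neg (by simp only [not_not]; fin_cases hc <;> decide), if_pos hc]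

theorem loopA_lbracket (rest : List Char) (cs os : List String) :
    pvLoopA ('[' :: rest) cs os =
      (match PySem.List.index? ('[' :: rest) ']' with
       | none => []
       | some e =>
           pvLoopA (List.drop (e + 1) ('[' :: rest))
             (String.ofList (PySem.List.slice ('[' :: rest) (some 1) (some (e : Int))) :: cs) os) := by
  rw [pvLoopA.eq_def]; dsimp only; simp [pvConstchar]

theorem loopA_backslash (rest : List Char) (cs os : List String) :
    pvLoopA ('\\' :: rest) cs os =
      (match rest with
       | [] => []
       | d :: rest2 => pvLoopA rest2 (String.ofList [d] :: String.ofList ['\\'] :: cs) os) := by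
  rw [pvLoopA.eq_def]; dsimp only; simp [pvConstchar]

theorem loopA_lparen (rest : List Char) (cs os : List String) :
    pvLoopA ('(' :: rest) cs os = pvLoopA rest cs (String.ofList ['('] :: os) := by
  rw [pvLoopA.eq_def]; dsimp only; simp [pvConstchar]

theorem loopA_rparen (rest : List Char) (cs os : List String) :
    pvLoopA (')' :: rest) cs os =
      (match (pvPopA cs os).2 with
       | [] => []
       | _ :: os' => pvLoopA rest (pvPopA cs os).1 os') := by
  rw [pvLoopA.eq_def]; dsimp only; simp [pvConstchar]

theorem loopA_op (c : Char) (rest : List Char) (cs os : List String)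
    (hc : c = '|' ∨ c = ']') :
    pvLoopA (c :: rest) cs os =
      (match os with
       | [] => pvLoopA rest cs [String.ofList [c]]
       | o :: _ =>
         if o = "(" then pvLoopA rest cs (String.ofList [c] :: os)
         else pvLoopA rest (String.ofList [c] :: cs) os) := by
  rcases hc with hc | hc <;> subst hc <;> rw [pvLoopA.eq_def] <;> dsimp only <;> simp [pvConstchar]

-- unfolding lemmas for pvTokenize
theorem tok_nil : pvTokenize [] = some [] := by rw [pvTokenize.eq_def]

theorem tok_lit (c : Char) (rest : List Char)
    (h1 : c ≠ '[') (h2 : c ≠ '\\')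
    (h5 : c ∉ pvConstchar ∨ c ∈ ['*', '+', '?', '.']) :
    pvTokenize (c :: rest) = (pvTokenize rest).map (PvTok.lit (String.ofList [c]) :: ·) := by
  rw [pvTokenize.eq_def]; dsimp only
  rw [if_neg h1, if_neg h2, if_pos h5]

theorem tok_lbracket (rest : List Char) :
    pvTokenize ('[' :: rest) =
      (match PySem.List.index? ('[' :: rest) ']' with
       | none => none
       | some e =>
           (pvTokenize (List.drop (e + 1) ('[' :: rest))).map
             (PvTok.lit (String.ofList (PySem.List.slice ('[' :: rest) (some 1) (some (e : Int)))) :: ·)) := by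
  rw [pvTokenize.eq_def]; dsimp only; rw [if_pos rfl]

theorem tok_backslash (rest : List Char) :
    pvTokenize ('\\' :: rest) =
      (match rest with
       | [] => none
       | d :: rest2 => (pvTokenize rest2).map (PvTok.lit "\\" :: PvTok.lit (String.ofList [d]) :: ·)) := by
  rw [pvTokenize.eq_def]; dsimp only; simp

theorem tok_op (c : Char) (rest : List Char)
    (h1 : c ≠ '[') (h2 : c ≠ '\\')
    (h5 : ¬(c ∉ pvConstchar ∨ c ∈ ['*', '+', '?', '.'])) :
    pvTokenize (c :: rest) = (pvTokenize rest).map (PvTok.op (String.ofList [c]) :: ·) := by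
  rw [pvTokenize.eq_def]; dsimp only
  rw [if_neg h1, if_neg h2, if_neg h5]

-- A's loop equals "tokenize, then process", with both error paths collapsing to []
theorem pvLoopA_eq_process (n : Nat) :
    ∀ (ans : List Char), ans.length ≤ n → ∀ (cs os : List String),
      pvLoopA ans cs os =
        (match pvTokenize ans with
         | none => []
         | some ts => pvProcess ts cs os) := by
  induction n with
  | zero =>
      intro ans h cs os
      have hnil : ans = [] := by cases ans with
        | nil => rfl
        | cons a l => simp at h
      subst hnil
      simp [loopA_nil, tok_nil, pvProcess]
  | succ n ih =>
      intro ans h cs os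
      match ans with
      | [] => simp [loopA_nil, tok_nil, pvProcess]
      | c :: rest =>
        by_cases h1 : c = '['
        · subst h1
          rw [loopA_lbracket, tok_lbracket]
          cases hi : PySem.List.index? ('[' :: rest) ']' with
          | none => simp
          | some e =>
              have hlt : (List.drop (e + 1) ('[' :: rest)).length ≤ n := by
                simp at h ⊢; omega
              simp only [ih _ hlt]
              cases pvTokenize (List.drop (e + 1) ('[' :: rest)) <;> simp [pvProcess]
        · by_cases h2 : c = '\\'
          · subst h2
            rw [loopA_backslash, tok_backslash]
            cases rest with
            | nil => simp
            | cons d rest2 =>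
                have hlt : rest2.length ≤ n := by simp at h; omega
                simp only [ih _ hlt]
                cases pvTokenize rest2 <;> simp [pvProcess]
          · have hlt : rest.length ≤ n := by simp at h; omega
            by_cases h5 : c ∉ pvConstchar ∨ c ∈ ['*', '+', '?', '.']
            · rw [loopA_lit c rest cs os h5, tok_lit c rest h1 h2 h5, ih _ hlt]
              cases pvTokenize rest <;> simp [pvProcess]
            · -- remaining const chars: '(' ')' '|' ']'
              have hmem : c ∈ pvConstchar := by
                by_contra hc; exact h5 (Or.inl hc)
              have hcase : c = '(' ∨ c = ')' ∨ c = '|' ∨ c = ']' := by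
                simp only [pvConstchar, List.mem_cons, List.not_mem_nil, or_false] at hmem
                rcases hmem with h|h|h|h|h|h|h|h|h|h <;> subst h <;> simp_all
              rcases hcase with h3 | h4 | hop
              · subst h3
                rw [loopA_lparen, tok_op '(' rest h1 h2 h5, ih _ hlt]
                cases pvTokenize rest <;> simp [pvProcess]
              · subst h4
                rw [loopA_rparen, tok_op ')' rest h1 h2 h5]
                cases hp : (pvPopA cs os).2 with
                | nil =>
                    cases pvTokenize rest <;> simp [pvProcess, pvPopB_eq_pvPopA, hp]
                | cons o os' =>
                    dsimp only
                    rw [ih _ hlt]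
                    cases pvTokenize rest <;> simp [pvProcess, pvPopB_eq_pvPopA, hp]
              · rw [loopA_op c rest cs os hop, tok_op c rest h1 h2 h5]
                have hne1 : String.ofList [c] ≠ "(" := by
                  rcases hop with h|h <;> subst h <;> decide
                have hne2 : String.ofList [c] ≠ ")" := by
                  rcases hop with h|h <;> subst h <;> decide
                cases os with
                | nil =>
                    rw [ih _ hlt]
                    cases pvTokenize rest <;> simp [pvProcess, hne1, hne2]
                | cons o os'' =>
                    dsimp only
                    by_cases ho : o = "("
                    · rw [if_pos ho, ih _ hlt, ho]
                      cases pvTokenize rest <;> simp [pvProcess, hne1, hne2]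
                    · rw [if_neg ho, ih _ hlt]
                      cases pvTokenize rest <;> simp [pvProcess, hne1, hne2, ho]

-- ===== VERDICT (by name: the statement is the Claim_ definition above) =====
theorem makePolishNotation_spec : Claim_equal_makePolishNotation := by
  intro re _ _
  unfold Spec_makePolishNotation makePolishNotation makePolishNotation_alt
  exact pvLoopA_eq_process re.toList.length re.toList le_rfl [] []
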